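-- pv_equiv track=rewrite | github.com/danielrandall/pythonTypes | src/constraintgenerator.py | find_largest_set_in_list_of_dicts
-- ===== SOURCE A (Python) =====
-- def find_largest_set_in_list_of_dicts(lod):
--     ''' Given a list of dicts, then each for key in the dicts the largest set
--         in the values is found. A dict containing the key and the largest
--         set is returned. '''
--     result_d = {}
--     for d in lod:
--         for k,v in d.items():
--             if k not in result_d:
--                 result_d[k] = v
--             elif len(d[k]) > len(result_d[k]):
--                 result_d[k] = v
--     return result_d
-- ===== SOURCE B (Python) =====
-- def find_largest_set_in_list_of_dicts(lod):
--     ''' Build an index of all values per key, then pick each key's first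
--         longest value.  max(vs, key=len) returns the earliest element of
--         maximal length, matching A's earliest-wins tie-breaking. '''
--     groups = {}
--     for d in lod:
--         for k, v in d.items():
--             groups.setdefault(k, []).append(v)
--     return {k: max(vs, key=len) for k, vs in groups.items()}
-- ===== Notes on version B (the rewrite author's own statement) =====
-- stated objective: idiomatic
-- what changed: A's single streaming scan with per-key running winners and repeated length comparisons against the result dict is replaced by a build-index-then-reduce decomposition: one pass groups all values per key, then a dict comprehension takes max(vs, key=len) per group.
import Mathlib
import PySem

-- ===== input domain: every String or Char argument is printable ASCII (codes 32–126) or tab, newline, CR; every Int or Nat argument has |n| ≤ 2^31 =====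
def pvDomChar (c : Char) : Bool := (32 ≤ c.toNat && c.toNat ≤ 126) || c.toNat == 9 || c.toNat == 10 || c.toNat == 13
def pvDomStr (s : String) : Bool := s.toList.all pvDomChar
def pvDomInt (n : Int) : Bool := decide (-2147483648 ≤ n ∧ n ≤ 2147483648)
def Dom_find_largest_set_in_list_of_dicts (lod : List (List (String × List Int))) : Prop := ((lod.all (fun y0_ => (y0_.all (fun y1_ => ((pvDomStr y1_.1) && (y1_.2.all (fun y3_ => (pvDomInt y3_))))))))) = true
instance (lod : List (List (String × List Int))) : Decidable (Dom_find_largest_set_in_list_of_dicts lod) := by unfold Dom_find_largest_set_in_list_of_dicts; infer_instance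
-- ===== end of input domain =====

-- B replaces A's streaming per-key running-winner scan by a build-index-then-reduce
-- decomposition (group all values per key, then take the first longest per group); idiomatic,
-- same cost. Equivalence is about the RETURN value; neither program mutates its argument.

-- ===== PORT A =====
-- Python A: result_d = {}; for d in lod: for k,v in d.items(): if k not in result_d: result_d[k]=v
--           elif len(d[k]) > len(result_d[k]): result_d[k]=v; return result_d
-- d[k] cannot raise (k comes from d.items()), so getD [] is exact there.
def find_largest_set_in_list_of_dicts (lod : List (List (String × List Int))) : List (String × List Int) :=
  (lod.foldl (fun res d =>
      d.foldl (fun res kv =>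
        if res.contains kv.1 = false then res.insert kv.1 kv.2
        else if ((PySem.Dict.mk d).getD kv.1 []).length > (res.getD kv.1 []).length then
          res.insert kv.1 kv.2
        else res) res)
    (PySem.Dict.empty : PySem.Dict String (List Int))).items

-- ===== PORT B =====
-- Python B: groups = {}; for d in lod: for k,v in d.items(): groups.setdefault(k, []).append(v)
--           return {k: max(vs, key=len) for k, vs in groups.items()}
-- max(vs, key=len) is PySem.List.max? vs List.length (first extremal); every group is
-- nonempty, so `.getD []` never supplies its default.
def find_largest_set_in_list_of_dicts_alt (lod : List (List (String × List Int))) : List (String × List Int) :=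
  let groups : PySem.Dict String (List (List Int)) :=
    lod.foldl (fun g d =>
      d.foldl (fun g kv => g.modify kv.1 [] (· ++ [kv.2])) g) PySem.Dict.empty
  groups.items.map (fun kv => (kv.1, (PySem.List.max? kv.2 List.length).getD []))

-- ===== PRECONDITION & SPEC =====
-- Pre_ requires every inner association list to have distinct keys: that is the invariant every
-- actual Python dict satisfies, so Pre_ excludes no input representable in Python — duplicate
-- keys exist only in the List-of-pairs encoding, where lookup order would be accidental.
def Pre_find_largest_set_in_list_of_dicts (lod : List (List (String × List Int))) : Prop :=
  ∀ d ∈ lod, (d.map (fun kv => kv.1)).Nodup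
instance (lod : List (List (String × List Int))) : Decidable (Pre_find_largest_set_in_list_of_dicts lod) := by unfold Pre_find_largest_set_in_list_of_dicts; infer_instance
def pvWitness_find_largest_set_in_list_of_dicts : (List (List (String × List Int))) :=
  [[("a", [1, 2]), ("b", [3])], [("a", [1, 2, 3])]]
def Spec_find_largest_set_in_list_of_dicts (lod : List (List (String × List Int))) (out : List (String × List Int)) : Prop := out = find_largest_set_in_list_of_dicts_alt lod
instance (lod : List (List (String × List Int))) (out : List (String × List Int)) : Decidable (Spec_find_largest_set_in_list_of_dicts lod out) := by unfold Spec_find_largest_set_in_list_of_dicts; infer_instance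

-- ===== CLAIM (what is proved, stated in full; the proofs are below) =====
def Claim_equal_find_largest_set_in_list_of_dicts : Prop := ∀ (lod : List (List (String × List Int))), Dom_find_largest_set_in_list_of_dicts lod → Pre_find_largest_set_in_list_of_dicts lod → Spec_find_largest_set_in_list_of_dicts lod (find_largest_set_in_list_of_dicts lod)

-- ===== LEMMAS AND PROOFS =====

def pvMaxLen (vs : List (List Int)) : List Int := (PySem.List.max? vs List.length).getD []

lemma pvMax_cons (t : List (List Int)) : ∀ a, PySem.List.max? (a :: t) List.length
    = some (t.foldl (fun m x => if m.length < x.length then x else m) a) := by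
  induction t with
  | nil => intro a; rfl
  | cons h t ih =>
    intro a
    have h1 : PySem.List.max? (a :: h :: t) List.length
        = PySem.List.max? ((if a.length < h.length then h else a) :: t) List.length := by
      simp only [PySem.List.max?, List.foldl_cons]; split <;> rfl
    rw [h1, ih]
    simp only [List.foldl_cons]

lemma pvMaxLen_append_singleton (vs : List (List Int)) (v : List Int) (h : vs ≠ []) :
    pvMaxLen (vs ++ [v]) = if (pvMaxLen vs).length < v.length then v else pvMaxLen vs := by
  obtain ⟨a, t, rfl⟩ := List.exists_cons_of_ne_nil h
  simp only [pvMaxLen, List.cons_append, pvMax_cons, List.foldl_append, List.foldl_cons,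
    List.foldl_nil, Option.getD_some]

def pvStepA (res : PySem.Dict String (List Int)) (kv : String × List Int) : PySem.Dict String (List Int) :=
  if res.contains kv.1 = false then res.insert kv.1 kv.2
  else if kv.2.length > (res.getD kv.1 []).length then res.insert kv.1 kv.2
  else res

def pvStepB (g : PySem.Dict String (List (List Int))) (kv : String × List Int) : PySem.Dict String (List (List Int)) :=
  g.modify kv.1 [] (· ++ [kv.2])

def pvReduce (g : PySem.Dict String (List (List Int))) : PySem.Dict String (List Int) :=
  PySem.Dict.mk (g.items.map (fun kv => (kv.1, pvMaxLen kv.2)))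

lemma pvReduce_contains (g : PySem.Dict String (List (List Int))) (k : String) :
    (pvReduce g).contains k = g.contains k := by
  simp [pvReduce, PySem.Dict.contains, List.any_map, Function.comp_def]

lemma pvReduce_getD (g : PySem.Dict String (List (List Int))) (k : String) :
    (pvReduce g).getD k [] = pvMaxLen (g.getD k []) := by
  obtain ⟨l⟩ := g
  induction l with
  | nil => rfl
  | cons p l ih =>
    obtain ⟨pk, pv⟩ := p
    by_cases hc : (pk == k) = true <;>
      simp only [pvReduce, List.map_cons, PySem.Dict.getD_eq_get?_getD,
        PySem.Dict.get?_mk_cons, hc, if_true, Option.getD_some] at ih ⊢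
    exact ih

lemma pvGroup_ne_nil (g : PySem.Dict String (List (List Int))) (k : String)
    (hnd : g.keys.Nodup) (hne : ∀ p ∈ g.items, p.2 ≠ []) (hc : g.contains k = true) :
    g.getD k [] ≠ [] := by
  rw [PySem.Dict.contains_iff_mem_keys] at hc
  simp only [PySem.Dict.keys, List.mem_map] at hc
  obtain ⟨p, hp, hpk⟩ := hc
  have := PySem.Dict.getD_of_mem_items (d := g) (k := p.1) (v := p.2) (by simpa using hp) hnd []
  rw [← hpk, this]
  exact hne p hp

lemma pvStep_comm (g : PySem.Dict String (List (List Int))) (kv : String × List Int)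
    (hnd : g.keys.Nodup) (hne : ∀ p ∈ g.items, p.2 ≠ []) :
    pvStepA (pvReduce g) kv = pvReduce (pvStepB g kv) := by
  obtain ⟨k, v⟩ := kv
  simp only [pvStepA, pvStepB, PySem.Dict.modify, pvReduce_contains]
  by_cases hc : g.contains k = true
  · rw [if_neg (by simp [hc])]
    have hvs : g.getD k [] ≠ [] := pvGroup_ne_nil g k hnd hne hc
    rw [pvReduce_getD]
    by_cases hlt : (pvMaxLen (g.getD k [])).length < v.length
    · rw [if_pos hlt]
      apply PySem.Dict.ext
      rw [PySem.Dict.items_insert_of_contains _ _ (by rw [pvReduce_contains]; exact hc)]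
      simp only [pvReduce, PySem.Dict.items_insert_of_contains _ _ hc]
      simp only [List.map_map]
      apply List.map_congr_left
      intro p hp
      by_cases hpk : (p.1 == k) = true
      · simp only [Function.comp_def, hpk, if_true]
        rw [pvMaxLen_append_singleton _ _ hvs, if_pos hlt]
      · have hne2 : ¬ p.1 = k := by simpa using hpk
        simp [hne2]
    · rw [if_neg hlt]
      apply PySem.Dict.ext
      simp only [pvReduce, PySem.Dict.items_insert_of_contains _ _ hc]
      simp only [List.map_map]
      apply Eq.symm
      apply List.map_congr_left
      intro p hp
      by_cases hpk : (p.1 == k) = true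
      · simp only [Function.comp_def, hpk, if_true]
        have hk : p.1 = k := by simpa using hpk
        have hgp : g.getD k [] = p.2 := by
          rw [← hk]; exact PySem.Dict.getD_of_mem_items g hp hnd []
        rw [pvMaxLen_append_singleton _ _ hvs, if_neg hlt, hgp, hk]
      · have hne2 : ¬ p.1 = k := by simpa using hpk
        simp [hne2]
  · have hc' : g.contains k = false := by simpa using hc
    rw [if_pos hc']
    apply PySem.Dict.ext
    rw [PySem.Dict.items_insert_of_not_contains _ _ (by rw [pvReduce_contains]; exact hc')]
    simp only [pvReduce, PySem.Dict.getD_of_not_contains _ _ hc',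
      PySem.Dict.items_insert_of_not_contains _ _ hc', List.map_append, List.map_cons, List.map_nil]
    rfl

lemma pvInvariant (ps : List (String × List Int)) (g : PySem.Dict String (List (List Int)))
    (hnd : g.keys.Nodup) (hne : ∀ p ∈ g.items, p.2 ≠ []) :
    ps.foldl pvStepA (pvReduce g) = pvReduce (ps.foldl pvStepB g) := by
  induction ps generalizing g with
  | nil => rfl
  | cons kv ps ih =>
    simp only [List.foldl_cons]
    rw [pvStep_comm g kv hnd hne]
    refine ih _ ?_ ?_
    · exact PySem.Dict.nodup_keys_insert _ _ _ hnd
    · intro p hp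
      simp only [pvStepB, PySem.Dict.modify] at hp
      rw [PySem.Dict.mem_items_insert] at hp
      rcases hp with h | ⟨h, _⟩
      · subst h; simp
      · exact hne p h

lemma pvFlatten {σ : Type} (f : σ → (String × List Int) → σ) (init : σ)
    (l : List (List (String × List Int))) :
    l.foldl (fun acc d => d.foldl f acc) init = (l.flatMap id).foldl f init := by
  rw [List.foldl_flatMap]
  rfl

-- ===== VERDICT (by name: the statement is the Claim_ definition above) =====
theorem find_largest_set_in_list_of_dicts_spec : Claim_equal_find_largest_set_in_list_of_dicts := by
  intro lod _ hpre
  unfold Spec_find_largest_set_in_list_of_dicts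
  unfold find_largest_set_in_list_of_dicts find_largest_set_in_list_of_dicts_alt
  have hA : lod.foldl (fun res d =>
        d.foldl (fun res kv =>
          if res.contains kv.1 = false then res.insert kv.1 kv.2
          else if ((PySem.Dict.mk d).getD kv.1 []).length > (res.getD kv.1 []).length then
            res.insert kv.1 kv.2
          else res) res) (PySem.Dict.empty : PySem.Dict String (List Int))
      = lod.foldl (fun res d => d.foldl pvStepA res) PySem.Dict.empty := by
    apply PySem.List.foldl_congr_mem
    intro res d hd
    apply PySem.List.foldl_congr_mem
    intro acc kv hkv
    have hget : (PySem.Dict.mk d).getD kv.1 [] = kv.2 := by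
      refine PySem.Dict.getD_of_mem_items _ ?_ ?_ []
      · exact hkv
      · simpa [PySem.Dict.keys] using hpre d hd
    simp only [pvStepA, hget]
  rw [hA, pvFlatten pvStepA]
  have hInv := pvInvariant (lod.flatMap id) PySem.Dict.empty PySem.Dict.nodup_keys_empty
    (fun p hp => absurd hp List.not_mem_nil)
  exact (congrArg PySem.Dict.items hInv).trans
    (congrArg (fun l => List.map (fun kv : String × List (List Int) =>
        (kv.1, (PySem.List.max? kv.2 List.length).getD [])) l)
      (congrArg PySem.Dict.items (pvFlatten pvStepB PySem.Dict.empty lod).symm))
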